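-- pv_equiv track=rewrite | github.com/novayo/LeetCode | 1594_Maximum_Non_Negative_Product_in_a_Matrix/try_1.py | maxProductPath
-- ===== SOURCE A (Python) =====
-- from typing import List
--
-- def maxProductPath(grid: List[List[int]]) -> int:
--     MOD = 10**9 + 7
--     height = len(grid)
--     width = len(grid[0])
--
--     dp = [[[-1, -1] for _ in range(width)] for __ in range(height)]
--     dp[0][0] = [grid[0][0], grid[0][0]]
--
--     # grid[0][*]
--     for j in range(1, width):
--         all_possible = [
--             grid[0][j] * dp[0][j-1][0],
--             grid[0][j] * dp[0][j-1][1]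
--         ]
--         dp[0][j] = [min(all_possible), max(all_possible)]
--
--     # grid[*][0]
--     for i in range(1, height):
--         all_possible = [
--             grid[i][0] * dp[i-1][0][0],
--             grid[i][0] * dp[i-1][0][1]
--         ]
--         dp[i][0] = [min(all_possible), max(all_possible)]
--
--     # grid[*][*]
--     for i in range(1, height):
--         for j in range(1, width):
--             all_possible = [
--                 grid[i][j] * dp[i-1][j][0],
--                 grid[i][j] * dp[i-1][j][1],
--                 grid[i][j] * dp[i][j-1][0],
--                 grid[i][j] * dp[i][j-1][1]
--             ]
--             dp[i][j] = [min(all_possible), max(all_possible)]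
--
--     return dp[-1][-1][1] % MOD if dp[-1][-1][1] >= 0 else -1
-- ===== SOURCE B (Python) =====
-- def maxProductPath(grid):
--     # Top-down memoized recursion: best(i, j) = (min, max) path product reaching (i, j).
--     MOD = 10 ** 9 + 7
--     memo = {}
--
--     def best(i, j):
--         if (i, j) in memo:
--             return memo[(i, j)]
--         v = grid[i][j]
--         if i == 0 and j == 0:
--             r = (v, v)
--         else:
--             cands = []
--             if i > 0:
--                 lo, hi = best(i - 1, j)
--                 cands += [v * lo, v * hi]
--             if j > 0:
--                 lo, hi = best(i, j - 1)
--                 cands += [v * lo, v * hi]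
--             r = (min(cands), max(cands))
--         memo[(i, j)] = r
--         return r
--
--     hi = best(len(grid) - 1, len(grid[0]) - 1)[1]
--     return hi % MOD if hi >= 0 else -1
-- ===== Notes on version B (the rewrite author's own statement) =====
-- stated objective: alternative
-- what changed: Replaces A's bottom-up dp matrix filled by three staged iterative passes (first row, first column, interior nested loops) with a single top-down memoized recursion best(i,j) that demands the (min,max) path products of its in-bounds predecessors and caches them in a dict.
-- outside the precondition, e.g. on maxProductPath([]): A raises IndexError, B raises IndexError; on maxProductPath([[1, 2], [3]]): A raises IndexError, B raises IndexError
import Mathlib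
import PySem

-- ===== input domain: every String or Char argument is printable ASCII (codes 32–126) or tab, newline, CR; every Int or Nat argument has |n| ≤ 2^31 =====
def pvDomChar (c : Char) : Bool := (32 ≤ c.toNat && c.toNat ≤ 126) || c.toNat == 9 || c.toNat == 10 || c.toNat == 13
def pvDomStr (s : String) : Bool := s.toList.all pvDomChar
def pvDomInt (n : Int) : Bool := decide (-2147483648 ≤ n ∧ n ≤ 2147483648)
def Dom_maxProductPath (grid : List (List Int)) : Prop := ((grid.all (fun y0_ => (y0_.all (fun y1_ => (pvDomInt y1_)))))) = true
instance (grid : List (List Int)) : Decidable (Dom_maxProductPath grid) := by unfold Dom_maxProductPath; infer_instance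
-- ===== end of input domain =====

-- B replaces A's bottom-up dp matrix filled by three staged passes with a single
-- top-down memoized recursion best(i, j) caching (min, max) path products in a dict.

-- ===== PORT A =====
-- grid[i][j] (indices read in range under Pre_, so the default is never returned)
def ggA (grid : List (List Int)) (i j : Nat) : Int := (grid.getD i []).getD j 0
-- dp cell read dp[i][j] and update dp[i][j] = v on the nested-list matrix
def getc (dp : List (List (Int × Int))) (i j : Nat) : Int × Int :=
  (dp.getD i []).getD j (-1, -1)
def setc (dp : List (List (Int × Int))) (i j : Nat) (v : Int × Int) : List (List (Int × Int)) :=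
  dp.set i ((dp.getD i []).set j v)

-- body of A's first loop (grid[0][*])
def stepRow0 (grid : List (List Int)) (dp : List (List (Int × Int))) (j : Nat) :
    List (List (Int × Int)) :=
  let all_possible := [ggA grid 0 j * (getc dp 0 (j - 1)).1, ggA grid 0 j * (getc dp 0 (j - 1)).2]
  setc dp 0 j ((PySem.List.min? all_possible (fun x => x)).getD 0,
               (PySem.List.max? all_possible (fun x => x)).getD 0)
-- body of A's second loop (grid[*][0])
def stepCol0 (grid : List (List Int)) (dp : List (List (Int × Int))) (i : Nat) :
    List (List (Int × Int)) :=
  let all_possible := [ggA grid i 0 * (getc dp (i - 1) 0).1, ggA grid i 0 * (getc dp (i - 1) 0).2]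
  setc dp i 0 ((PySem.List.min? all_possible (fun x => x)).getD 0,
               (PySem.List.max? all_possible (fun x => x)).getD 0)
-- body of A's inner third loop (grid[*][*])
def stepInner (grid : List (List Int)) (i : Nat) (dp : List (List (Int × Int))) (j : Nat) :
    List (List (Int × Int)) :=
  let all_possible := [ggA grid i j * (getc dp (i - 1) j).1, ggA grid i j * (getc dp (i - 1) j).2,
                       ggA grid i j * (getc dp i (j - 1)).1, ggA grid i j * (getc dp i (j - 1)).2]
  setc dp i j ((PySem.List.min? all_possible (fun x => x)).getD 0,
               (PySem.List.max? all_possible (fun x => x)).getD 0)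
-- body of A's outer third loop
def stepOuter (grid : List (List Int)) (dp : List (List (Int × Int))) (i : Nat) :
    List (List (Int × Int)) :=
  (List.range' 1 ((grid.headD []).length - 1)).foldl (stepInner grid i) dp

-- literal transliteration of A: dp matrix initialised to (-1,-1), first-row pass,
-- first-column pass, interior double pass, then dp[-1][-1][1] (= cell (h-1, w-1),
-- since the matrix shape is preserved).
def maxProductPath (grid : List (List Int)) : Int :=
  let MOD : Int := 10 ^ 9 + 7
  let height := grid.length
  let width := (grid.headD []).length
  let dp : List (List (Int × Int)) :=
    List.replicate height (List.replicate width ((-1 : Int), (-1 : Int)))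
  let dp := setc dp 0 0 (ggA grid 0 0, ggA grid 0 0)
  let dp := (List.range' 1 (width - 1)).foldl (stepRow0 grid) dp
  let dp := (List.range' 1 (height - 1)).foldl (stepCol0 grid) dp
  let dp := (List.range' 1 (height - 1)).foldl (stepOuter grid) dp
  let last := getc dp (height - 1) (width - 1)
  if last.2 ≥ 0 then PySem.Int.mod last.2 MOD else -1

-- ===== PORT B =====
-- grid[i][j] for B (indices in range under Pre_)
def ggB (grid : List (List Int)) (i j : Nat) : Int := (grid.getD i []).getD j 0

-- Source B's recursive helper best(i, j): memo lookup, else recurse on the in-bounds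
-- predecessors (up first, then left, as the Python appends to cands), store in memo.
-- The shared mutable memo dict is threaded explicitly as state.
def bestMemo (grid : List (List Int)) (i j : Nat)
    (memo : PySem.Dict (Nat × Nat) (Int × Int)) :
    (Int × Int) × PySem.Dict (Nat × Nat) (Int × Int) :=
  match memo.get? (i, j) with
  | some r => (r, memo)
  | none =>
    let v := ggB grid i j
    let rm : (Int × Int) × PySem.Dict (Nat × Nat) (Int × Int) :=
      match i, j with
      | 0, 0 => ((v, v), memo)
      | 0, j0 + 1 =>
          let pm := bestMemo grid 0 j0 memo
          ((min (v * pm.1.1) (v * pm.1.2), max (v * pm.1.1) (v * pm.1.2)), pm.2)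
      | i0 + 1, 0 =>
          let pm := bestMemo grid i0 0 memo
          ((min (v * pm.1.1) (v * pm.1.2), max (v * pm.1.1) (v * pm.1.2)), pm.2)
      | i0 + 1, j0 + 1 =>
          let um := bestMemo grid i0 (j0 + 1) memo
          let lm := bestMemo grid (i0 + 1) j0 um.2
          ((min (min (min (v * um.1.1) (v * um.1.2)) (v * lm.1.1)) (v * lm.1.2),
            max (max (max (v * um.1.1) (v * um.1.2)) (v * lm.1.1)) (v * lm.1.2)), lm.2)
    (rm.1, rm.2.insert (i, j) rm.1)
  termination_by i + j
  decreasing_by all_goals omega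

-- literal transliteration of Source B: one call to the memoized recursion from the
-- bottom-right corner with an empty memo, then the final MOD / -1 branch.
def maxProductPath_alt (grid : List (List Int)) : Int :=
  let MOD : Int := 10 ^ 9 + 7
  let hi := (bestMemo grid (grid.length - 1) ((grid.headD []).length - 1) PySem.Dict.empty).1.2
  if hi ≥ 0 then PySem.Int.mod hi MOD else -1

-- ===== PRECONDITION & SPEC =====
-- Pre_ excludes exactly the inputs on which the Python A raises IndexError:
-- an empty grid, an empty first row, or some row shorter than the first row.
def Pre_maxProductPath (grid : List (List Int)) : Prop :=
  grid ≠ [] ∧ grid.headD [] ≠ [] ∧ ∀ row ∈ grid, (grid.headD []).length ≤ row.length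
instance (grid : List (List Int)) : Decidable (Pre_maxProductPath grid) := by
  unfold Pre_maxProductPath; infer_instance
def pvWitness_maxProductPath : List (List Int) := [[1, -2], [3, 4]]

def Spec_maxProductPath (grid : List (List Int)) (out : Int) : Prop := out = maxProductPath_alt grid
instance (grid : List (List Int)) (out : Int) : Decidable (Spec_maxProductPath grid out) := by
  unfold Spec_maxProductPath; infer_instance

-- ===== CLAIM (what is proved, stated in full; the proofs are below) =====
def Claim_equal_maxProductPath : Prop := ∀ (grid : List (List Int)), Dom_maxProductPath grid → Pre_maxProductPath grid → Spec_maxProductPath grid (maxProductPath grid)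

-- ===== LEMMAS AND PROOFS =====

-- the common recurrence: (min, max) of path products reaching cell (i, j)
def best (grid : List (List Int)) : Nat → Nat → Int × Int
  | 0, 0 => (ggA grid 0 0, ggA grid 0 0)
  | 0, j + 1 =>
      let p := best grid 0 j
      let v := ggA grid 0 (j + 1)
      (min (v * p.1) (v * p.2), max (v * p.1) (v * p.2))
  | i + 1, 0 =>
      let p := best grid i 0
      let v := ggA grid (i + 1) 0
      (min (v * p.1) (v * p.2), max (v * p.1) (v * p.2))
  | i + 1, j + 1 =>
      let u := best grid i (j + 1)
      let l := best grid (i + 1) j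
      let v := ggA grid (i + 1) (j + 1)
      (min (min (min (v * u.1) (v * u.2)) (v * l.1)) (v * l.2),
       max (max (max (v * u.1) (v * u.2)) (v * l.1)) (v * l.2))

def ShapeDP (dp : List (List (Int × Int))) (h w : Nat) : Prop :=
  dp.length = h ∧ ∀ i, i < h → (dp.getD i []).length = w

theorem shape_setc {dp : List (List (Int × Int))} {h w : Nat} (hs : ShapeDP dp h w)
    (i j : Nat) (v : Int × Int) : ShapeDP (setc dp i j v) h w := by
  obtain ⟨hl, hr⟩ := hs
  refine ⟨by simpa [setc] using hl, fun i' hi' => ?_⟩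
  have hlen : i' < dp.length := by omega
  by_cases hii : i' = i
  · subst hii
    simp only [setc, List.getD, List.getElem?_set_self hlen, Option.getD_some,
      List.length_set]
    simpa [List.getD] using hr i' hi'
  · simp only [setc, List.getD, List.getElem?_set_ne (fun h => hii h.symm)]
    simpa [List.getD] using hr i' hi'

theorem getc_setc_self {dp : List (List (Int × Int))} {h w : Nat} (hs : ShapeDP dp h w)
    {i j : Nat} (hi : i < h) (hj : j < w) (v : Int × Int) :
    getc (setc dp i j v) i j = v := by
  obtain ⟨hl, hr⟩ := hs
  have hlen : i < dp.length := by omega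
  have hrow : j < (dp.getD i []).length := by rw [hr i hi]; exact hj
  simp [getc, setc, List.getD, List.getElem?_set_self hlen,
    List.getElem?_set_self (by simpa [List.getD] using hrow)]

theorem getc_setc_row_ne {dp : List (List (Int × Int))} {i i' : Nat} (hne : i' ≠ i)
    (j j' : Nat) (v : Int × Int) : getc (setc dp i j v) i' j' = getc dp i' j' := by
  simp [getc, setc, List.getD, List.getElem?_set_ne (fun h => hne h.symm)]

theorem getc_setc_col_ne {dp : List (List (Int × Int))} {j j' : Nat} (hne : j' ≠ j)
    (i i' : Nat) (v : Int × Int) : getc (setc dp i j v) i' j' = getc dp i' j' := by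
  by_cases hii : i' = i
  · subst hii
    by_cases hlen : i' < dp.length
    · simp [getc, setc, List.getD, List.getElem?_set_self hlen,
        List.getElem?_set_ne (fun h => hne h.symm)]
    · rw [setc, List.set_eq_of_length_le (by omega)]
  · simp [getc, setc, List.getD, List.getElem?_set_ne (fun h => hii h.symm)]

theorem range'_concat1 (n : Nat) : List.range' 1 (n + 1) = List.range' 1 n ++ [n + 1] := by
  simp [List.range'_concat]; omega

theorem minD2 (a b : Int) : (PySem.List.min? [a, b] (fun x => x)).getD 0 = min a b := by
  simp [PySem.List.min?_id_cons]

theorem maxD2 (a b : Int) : (PySem.List.max? [a, b] (fun x => x)).getD 0 = max a b := by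
  simp [PySem.List.max?_id_cons]

theorem minD4 (a b c d : Int) :
    (PySem.List.min? [a, b, c, d] (fun x => x)).getD 0 = min (min (min a b) c) d := by
  simp [PySem.List.min?_id_cons]

theorem maxD4 (a b c d : Int) :
    (PySem.List.max? [a, b, c, d] (fun x => x)).getD 0 = max (max (max a b) c) d := by
  simp [PySem.List.max?_id_cons]

-- ---- A side: the three passes compute `best` ----

theorem phase1 (grid : List (List Int)) (h w : Nat) (hh : 0 < h) (hw : 0 < w)
    (dp : List (List (Int × Int))) (hs : ShapeDP dp h w)
    (h0 : getc dp 0 0 = best grid 0 0) :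
    ∀ n, n ≤ w - 1 →
      ShapeDP ((List.range' 1 n).foldl (stepRow0 grid) dp) h w ∧
      ∀ j ≤ n, getc ((List.range' 1 n).foldl (stepRow0 grid) dp) 0 j = best grid 0 j := by
  intro n
  induction n with
  | zero =>
    intro _
    exact ⟨hs, fun j hj => by interval_cases j; exact h0⟩
  | succ n ih =>
    intro hn
    obtain ⟨hs1, hb1⟩ := ih (by omega)
    rw [range'_concat1, List.foldl_append, List.foldl_cons, List.foldl_nil]
    set dp1 := (List.range' 1 n).foldl (stepRow0 grid) dp with hdp1
    have hread : getc dp1 0 n = best grid 0 n := hb1 n le_rfl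
    have hstep : stepRow0 grid dp1 (n + 1) = setc dp1 0 (n + 1) (best grid 0 (n + 1)) := by
      simp only [stepRow0, Nat.add_sub_cancel, hread, minD2, maxD2]
      congr 1
      simp [best]
    rw [hstep]
    refine ⟨shape_setc hs1 _ _ _, fun j hj => ?_⟩
    by_cases hj' : j = n + 1
    · subst hj'
      rw [getc_setc_self hs1 hh (by omega)]
    · rw [getc_setc_col_ne (by omega)]
      exact hb1 j (by omega)

theorem phase2 (grid : List (List Int)) (h w : Nat) (hh : 0 < h) (hw : 0 < w)
    (dp : List (List (Int × Int))) (hs : ShapeDP dp h w)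
    (hrow0 : ∀ j < w, getc dp 0 j = best grid 0 j) :
    ∀ n, n ≤ h - 1 →
      ShapeDP ((List.range' 1 n).foldl (stepCol0 grid) dp) h w ∧
      (∀ j < w, getc ((List.range' 1 n).foldl (stepCol0 grid) dp) 0 j = best grid 0 j) ∧
      ∀ i ≤ n, getc ((List.range' 1 n).foldl (stepCol0 grid) dp) i 0 = best grid i 0 := by
  intro n
  induction n with
  | zero =>
    intro _
    exact ⟨hs, hrow0, fun i hi => by interval_cases i; exact hrow0 0 hw⟩
  | succ n ih =>
    intro hn
    obtain ⟨hs1, hr1, hc1⟩ := ih (by omega)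
    rw [range'_concat1, List.foldl_append, List.foldl_cons, List.foldl_nil]
    set dp1 := (List.range' 1 n).foldl (stepCol0 grid) dp with hdp1
    have hread : getc dp1 n 0 = best grid n 0 := hc1 n le_rfl
    have hstep : stepCol0 grid dp1 (n + 1) = setc dp1 (n + 1) 0 (best grid (n + 1) 0) := by
      simp only [stepCol0, Nat.add_sub_cancel, hread, minD2, maxD2]
      congr 1
      simp [best]
    rw [hstep]
    refine ⟨shape_setc hs1 _ _ _, fun j hj => ?_, fun i hi => ?_⟩
    · rw [getc_setc_row_ne (by omega)]
      exact hr1 j hj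
    · by_cases hi' : i = n + 1
      · subst hi'
        rw [getc_setc_self hs1 (by omega) hw]
      · rw [getc_setc_row_ne (by omega)]
        exact hc1 i (by omega)

def InvA (grid : List (List Int)) (dp : List (List (Int × Int))) (h w i k : Nat) : Prop :=
  ShapeDP dp h w ∧
  (∀ i' j, i' < i → j < w → getc dp i' j = best grid i' j) ∧
  (∀ j ≤ k, getc dp i j = best grid i j) ∧
  (∀ i', i ≤ i' → i' < h → getc dp i' 0 = best grid i' 0)

theorem phase3_inner (grid : List (List Int)) (h w : Nat) (hh : 0 < h) (hw : 0 < w)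
    (i : Nat) (hi : 0 < i) (hih : i ≤ h - 1)
    (dp : List (List (Int × Int))) (hinv : InvA grid dp h w i 0) :
    ∀ n, n ≤ w - 1 → InvA grid ((List.range' 1 n).foldl (stepInner grid i) dp) h w i n := by
  intro n
  induction n with
  | zero => intro _; exact hinv
  | succ n ih =>
    intro hn
    obtain ⟨hs1, hup1, hrow1, hcol1⟩ := ih (by omega)
    rw [range'_concat1, List.foldl_append, List.foldl_cons, List.foldl_nil]
    set dp1 := (List.range' 1 n).foldl (stepInner grid i) dp with hdp1
    obtain ⟨i0, rfl⟩ : ∃ i0, i = i0 + 1 := ⟨i - 1, by omega⟩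
    have hu : getc dp1 i0 (n + 1) = best grid i0 (n + 1) := hup1 i0 (n + 1) (by omega) (by omega)
    have hl : getc dp1 (i0 + 1) n = best grid (i0 + 1) n := hrow1 n le_rfl
    have hstep : stepInner grid (i0 + 1) dp1 (n + 1) =
        setc dp1 (i0 + 1) (n + 1) (best grid (i0 + 1) (n + 1)) := by
      simp only [stepInner, Nat.add_sub_cancel, hu, hl, minD4, maxD4]
      congr 1
      simp [best]
    rw [hstep]
    refine ⟨shape_setc hs1 _ _ _, fun i' j hi' hj => ?_, fun j hj => ?_, fun i' hi' hi'' => ?_⟩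
    · rw [getc_setc_row_ne (by omega)]
      exact hup1 i' j hi' hj
    · by_cases hj' : j = n + 1
      · subst hj'
        rw [getc_setc_self hs1 (by omega) (by omega)]
      · rw [getc_setc_col_ne (by omega)]
        exact hrow1 j (by omega)
    · rw [getc_setc_col_ne (by omega)]
      exact hcol1 i' hi' hi''

def OInvA (grid : List (List Int)) (dp : List (List (Int × Int))) (h w n : Nat) : Prop :=
  ShapeDP dp h w ∧
  (∀ i' ≤ n, ∀ j < w, getc dp i' j = best grid i' j) ∧
  (∀ i' < h, getc dp i' 0 = best grid i' 0)

theorem phase3_outer (grid : List (List Int)) (h w : Nat) (hh : 0 < h) (hw : 0 < w)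
    (hW : w = (grid.headD []).length)
    (dp : List (List (Int × Int))) (hinv : OInvA grid dp h w 0) :
    ∀ n, n ≤ h - 1 → OInvA grid ((List.range' 1 n).foldl (stepOuter grid) dp) h w n := by
  intro n
  induction n with
  | zero => intro _; exact hinv
  | succ n ih =>
    intro hn
    obtain ⟨hs1, hfull1, hcol1⟩ := ih (by omega)
    rw [range'_concat1, List.foldl_append, List.foldl_cons, List.foldl_nil]
    set dp1 := (List.range' 1 n).foldl (stepOuter grid) dp with hdp1
    have hinner : InvA grid dp1 h w (n + 1) 0 :=
      ⟨hs1, fun i' j hi' hj => hfull1 i' (by omega) j hj,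
       fun j hj => by interval_cases j; exact hcol1 (n + 1) (by omega),
       fun i' _ hi' => hcol1 i' hi'⟩
    have := phase3_inner grid h w hh hw (n + 1) (by omega) (by omega) dp1 hinner (w - 1) le_rfl
    obtain ⟨hs2, hup2, hrow2, hcol2⟩ := this
    have hso : stepOuter grid dp1 (n + 1) =
        (List.range' 1 (w - 1)).foldl (stepInner grid (n + 1)) dp1 := by
      rw [stepOuter, hW]
    rw [hso]
    refine ⟨hs2, fun i' hi' j hj => ?_, fun i' hi' => ?_⟩
    · by_cases hii : i' = n + 1
      · subst hii
        exact hrow2 j (by omega)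
      · exact hup2 i' j (by omega) hj
    · by_cases hii : i' ≤ n
      · exact hup2 i' 0 (by omega) hw
      · exact hcol2 i' (by omega) hi'

-- ---- B side: the memoized recursion computes `best` ----

-- memo invariant: every cached value is the true (min, max) pair
def GoodMemo (grid : List (List Int)) (memo : PySem.Dict (Nat × Nat) (Int × Int)) : Prop :=
  ∀ p r, memo.get? p = some r → r = best grid p.1 p.2

theorem goodMemo_insert {grid : List (List Int)}
    {memo : PySem.Dict (Nat × Nat) (Int × Int)} (hg : GoodMemo grid memo)
    {i j : Nat} {r : Int × Int} (hr : r = best grid i j) :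
    GoodMemo grid (memo.insert (i, j) r) := by
  intro p r' h
  rw [PySem.Dict.get?_insert] at h
  split at h
  · rename_i hp
    subst hp
    cases h
    exact hr
  · exact hg p r' h

theorem ggB_eq_ggA (grid : List (List Int)) (i j : Nat) : ggB grid i j = ggA grid i j := rfl

theorem bestMemo_correct (grid : List (List Int)) :
    ∀ n i j (memo : PySem.Dict (Nat × Nat) (Int × Int)), i + j ≤ n → GoodMemo grid memo →
      (bestMemo grid i j memo).1 = best grid i j ∧ GoodMemo grid (bestMemo grid i j memo).2 := by
  intro n
  induction n with
  | zero =>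
    intro i j memo hle hg
    obtain ⟨rfl, rfl⟩ : i = 0 ∧ j = 0 := by omega
    rw [bestMemo]
    cases hmem : memo.get? (0, 0) with
    | some r =>
      exact ⟨hg _ _ hmem, hg⟩
    | none =>
      exact ⟨by simp [best, ggB_eq_ggA], goodMemo_insert hg (by simp [best, ggB_eq_ggA])⟩
  | succ n ih =>
    intro i j memo hle hg
    rw [bestMemo]
    cases hmem : memo.get? (i, j) with
    | some r =>
      exact ⟨hg _ _ hmem, hg⟩
    | none =>
      match i, j with
      | 0, 0 =>
        exact ⟨by simp [best, ggB_eq_ggA], goodMemo_insert hg (by simp [best, ggB_eq_ggA])⟩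
      | 0, j0 + 1 =>
        obtain ⟨hp, hgp⟩ := ih 0 j0 memo (by omega) hg
        have hb : (min (ggB grid 0 (j0 + 1) * (bestMemo grid 0 j0 memo).1.1)
                       (ggB grid 0 (j0 + 1) * (bestMemo grid 0 j0 memo).1.2),
                   max (ggB grid 0 (j0 + 1) * (bestMemo grid 0 j0 memo).1.1)
                       (ggB grid 0 (j0 + 1) * (bestMemo grid 0 j0 memo).1.2)) =
                  best grid 0 (j0 + 1) := by
          rw [hp]; simp [best, ggB_eq_ggA]
        exact ⟨hb, goodMemo_insert hgp hb⟩
      | i0 + 1, 0 =>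
        obtain ⟨hp, hgp⟩ := ih i0 0 memo (by omega) hg
        have hb : (min (ggB grid (i0 + 1) 0 * (bestMemo grid i0 0 memo).1.1)
                       (ggB grid (i0 + 1) 0 * (bestMemo grid i0 0 memo).1.2),
                   max (ggB grid (i0 + 1) 0 * (bestMemo grid i0 0 memo).1.1)
                       (ggB grid (i0 + 1) 0 * (bestMemo grid i0 0 memo).1.2)) =
                  best grid (i0 + 1) 0 := by
          rw [hp]; simp [best, ggB_eq_ggA]
        exact ⟨hb, goodMemo_insert hgp hb⟩
      | i0 + 1, j0 + 1 =>
        obtain ⟨hu, hgu⟩ := ih i0 (j0 + 1) memo (by omega) hg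
        obtain ⟨hl, hgl⟩ := ih (i0 + 1) j0 (bestMemo grid i0 (j0 + 1) memo).2 (by omega) hgu
        have hb : (min (min (min (ggB grid (i0 + 1) (j0 + 1) * (bestMemo grid i0 (j0 + 1) memo).1.1)
                                 (ggB grid (i0 + 1) (j0 + 1) * (bestMemo grid i0 (j0 + 1) memo).1.2))
                            (ggB grid (i0 + 1) (j0 + 1) * (bestMemo grid (i0 + 1) j0 (bestMemo grid i0 (j0 + 1) memo).2).1.1))
                       (ggB grid (i0 + 1) (j0 + 1) * (bestMemo grid (i0 + 1) j0 (bestMemo grid i0 (j0 + 1) memo).2).1.2),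
                   max (max (max (ggB grid (i0 + 1) (j0 + 1) * (bestMemo grid i0 (j0 + 1) memo).1.1)
                                 (ggB grid (i0 + 1) (j0 + 1) * (bestMemo grid i0 (j0 + 1) memo).1.2))
                            (ggB grid (i0 + 1) (j0 + 1) * (bestMemo grid (i0 + 1) j0 (bestMemo grid i0 (j0 + 1) memo).2).1.1))
                       (ggB grid (i0 + 1) (j0 + 1) * (bestMemo grid (i0 + 1) j0 (bestMemo grid i0 (j0 + 1) memo).2).1.2)) =
                  best grid (i0 + 1) (j0 + 1) := by
          rw [hu, hl]; simp [best, ggB_eq_ggA]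
        exact ⟨hb, goodMemo_insert hgl hb⟩

-- ===== VERDICT (by name: the statement is the Claim_ definition above) =====
theorem maxProductPath_spec : Claim_equal_maxProductPath := by
  intro grid _ hpre
  obtain ⟨hne, hrowne, _⟩ := hpre
  have hh : 0 < grid.length := List.length_pos_of_ne_nil hne
  have hw : 0 < (grid.headD []).length := List.length_pos_of_ne_nil hrowne
  unfold Spec_maxProductPath maxProductPath maxProductPath_alt
  dsimp only
  -- A side
  have hs0 : ShapeDP (List.replicate grid.length
      (List.replicate (grid.headD []).length ((-1 : Int), (-1 : Int))))
      grid.length (grid.headD []).length := by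
    refine ⟨by simp, fun i hi => ?_⟩
    simp [List.getD, hi]
  have hs0' := shape_setc hs0 0 0 (ggA grid 0 0, ggA grid 0 0)
  have h00 : getc (setc (List.replicate grid.length
      (List.replicate (grid.headD []).length ((-1 : Int), (-1 : Int)))) 0 0
      (ggA grid 0 0, ggA grid 0 0)) 0 0 = best grid 0 0 := by
    rw [getc_setc_self hs0 hh hw]
    simp [best]
  obtain ⟨hs1, hb1⟩ := phase1 grid _ _ hh hw _ hs0' h00 ((grid.headD []).length - 1) le_rfl
  obtain ⟨hs2, hr2, hc2⟩ := phase2 grid _ _ hh hw _ hs1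
    (fun j hj => hb1 j (by omega)) (grid.length - 1) le_rfl
  have hoinv : OInvA grid _ grid.length (grid.headD []).length 0 :=
    ⟨hs2, fun i' hi' j hj => by interval_cases i'; exact hr2 j hj,
     fun i' hi' => hc2 i' (by omega)⟩
  obtain ⟨hs3, hfull3, _⟩ := phase3_outer grid _ _ hh hw rfl _ hoinv (grid.length - 1) le_rfl
  have hA := hfull3 (grid.length - 1) le_rfl ((grid.headD []).length - 1) (by omega)
  rw [hA]
  -- B side
  have hB := (bestMemo_correct grid ((grid.length - 1) + ((grid.headD []).length - 1))
    (grid.length - 1) ((grid.headD []).length - 1) PySem.Dict.empty le_rfl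
    (fun p r h => by simp [PySem.Dict.get?_empty] at h)).1
  rw [hB]
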